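-- pv_equiv track=rewrite | github.com/ayushhhthakur/Python-Training-2 | Day_08.py | fill_water_tanks
-- ===== SOURCE A (Python) =====
-- def fill_water_tanks(buildings, r, unit_capacity):
--     # Create a list of tuples (building index, water availability)
--     building_list = [(i, water) for i, water in enumerate(buildings)]
--
--     # Sort the list in descending order of water availability
--     building_list.sort(key=lambda x: x[1], reverse=True)
--
--     tanks_filled = 0
--     filled_buildings = []
--
--     for building, water in building_list:
--         tanks_needed = (water + unit_capacity - 1) // unit_capacity  # Calculate tanks needed for this building
--         tanks_to_fill = min(r - tanks_filled, tanks_needed)  # Fill as many tanks as possible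
--
--         if tanks_to_fill > 0:
--             tanks_filled += tanks_to_fill
--             filled_buildings.append(building)
--
--         if tanks_filled >= r:
--             break
--
--     return filled_buildings
-- ===== SOURCE B (Python) =====
-- def fill_water_tanks(buildings, r, unit_capacity):
--     # Lazy selection instead of a full sort: repeatedly extract the first
--     # building with maximal water from the remaining pool, stopping as soon
--     # as r tanks are filled.  First-maximal extraction reproduces the stable
--     # descending sort's tie order (equal water -> lowest index first).
--     remaining = list(enumerate(buildings))
--     tanks_filled = 0
--     filled_buildings = []
--     while remaining:
--         # water level of the best remaining building
--         best_water = remaining[0][1]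
--         for _, w in remaining[1:]:
--             if w > best_water:
--                 best_water = w
--         # remove the first remaining building holding that much water
--         k = 0
--         while remaining[k][1] != best_water:
--             k += 1
--         building = remaining[k][0]
--         remaining = remaining[:k] + remaining[k + 1:]
--         tanks_needed = (best_water + unit_capacity - 1) // unit_capacity
--         tanks_to_fill = min(r - tanks_filled, tanks_needed)
--         if tanks_to_fill > 0:
--             tanks_filled += tanks_to_fill
--             filled_buildings.append(building)
--         if tanks_filled >= r:
--             break
--     return filled_buildings
-- ===== Notes on version B (the rewrite author's own statement) =====
-- stated objective: alternative
-- what changed: Replaces A's full stable descending sort followed by a scan with lazy selection: B repeatedly extracts the first remaining building of maximal water (reproducing the stable tie order) and stops as soon as r tanks are filled, so no sorted list is ever built.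
import Mathlib
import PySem

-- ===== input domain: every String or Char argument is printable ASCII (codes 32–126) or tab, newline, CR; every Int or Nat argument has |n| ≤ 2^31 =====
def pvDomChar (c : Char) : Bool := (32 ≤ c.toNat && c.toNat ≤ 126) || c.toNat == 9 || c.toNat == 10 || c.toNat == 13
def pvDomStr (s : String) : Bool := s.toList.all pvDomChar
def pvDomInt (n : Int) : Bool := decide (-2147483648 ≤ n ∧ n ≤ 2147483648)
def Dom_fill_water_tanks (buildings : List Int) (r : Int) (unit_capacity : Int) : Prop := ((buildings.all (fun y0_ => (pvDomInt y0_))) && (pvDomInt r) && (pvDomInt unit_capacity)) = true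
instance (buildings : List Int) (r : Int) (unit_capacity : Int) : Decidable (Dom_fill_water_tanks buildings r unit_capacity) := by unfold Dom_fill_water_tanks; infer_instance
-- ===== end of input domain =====

-- B replaces A's full stable descending sort by lazy selection: it repeatedly extracts
-- the first remaining building of maximal water and stops once r tanks are filled
-- (objective: alternative — same values, including tie order, different algorithm).

-- ===== PORT A =====
-- the for-loop of A over the sorted list, with its two accumulators and the break
def pvLoopA (r unit_capacity : Int) : List (Int × Int) → Int → List Int → List Int
  | [], _, filled => filled
  | (building, water) :: rest, tanks_filled, filled =>
      let tanks_needed := PySem.Int.floordiv (water + unit_capacity - 1) unit_capacity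
      let tanks_to_fill := min (r - tanks_filled) tanks_needed
      let tanks_filled' := if tanks_to_fill > 0 then tanks_filled + tanks_to_fill else tanks_filled
      let filled' := if tanks_to_fill > 0 then filled ++ [building] else filled
      if tanks_filled' ≥ r then filled'
      else pvLoopA r unit_capacity rest tanks_filled' filled'

def fill_water_tanks (buildings : List Int) (r : Int) (unit_capacity : Int) : List Int :=
  pvLoopA r unit_capacity
    (PySem.List.sorted (PySem.List.enumerate buildings) (fun x => x.2) true) 0 []

-- ===== PORT B =====
-- Source B's inner while search ('k += 1 until remaining[k][1] == best_water', then
-- remaining[:k] + remaining[k+1:]): structural scan removing the first pair whose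
-- water equals bw; exact since bw always occurs in the list
def pvExtract (bw : Int) : List (Int × Int) → Int × List (Int × Int)
  | [] => (0, [])
  | p :: rest =>
      if p.2 = bw then (p.1, rest)
      else
        let (b, rem) := pvExtract bw rest
        (b, p :: rem)

-- Source B's outer while loop; fuel = initial length of remaining (each pass removes one pair)
def pvLoopB (r unit_capacity : Int) : Nat → List (Int × Int) → Int → List Int → List Int
  | _, [], _, filled => filled
  | 0, _ :: _, _, filled => filled
  | fuel + 1, p :: rest, tanks_filled, filled =>
      let best_water := rest.foldl (fun bw q => if q.2 > bw then q.2 else bw) p.2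
      let (building, remaining') := pvExtract best_water (p :: rest)
      let tanks_needed := PySem.Int.floordiv (best_water + unit_capacity - 1) unit_capacity
      let tanks_to_fill := min (r - tanks_filled) tanks_needed
      let tanks_filled' := if tanks_to_fill > 0 then tanks_filled + tanks_to_fill else tanks_filled
      let filled' := if tanks_to_fill > 0 then filled ++ [building] else filled
      if tanks_filled' ≥ r then filled'
      else pvLoopB r unit_capacity fuel remaining' tanks_filled' filled'

def fill_water_tanks_alt (buildings : List Int) (r : Int) (unit_capacity : Int) : List Int :=
  pvLoopB r unit_capacity buildings.length (PySem.List.enumerate buildings) 0 []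

-- ===== PRECONDITION & SPEC =====
-- Pre_ excludes exactly the inputs where the Python A raises ZeroDivisionError:
-- unit_capacity = 0 with a nonempty buildings list (B raises there too).
def Pre_fill_water_tanks (buildings : List Int) (r : Int) (unit_capacity : Int) : Prop :=
  unit_capacity ≠ 0 ∨ buildings = []
instance (buildings : List Int) (r : Int) (unit_capacity : Int) : Decidable (Pre_fill_water_tanks buildings r unit_capacity) := by unfold Pre_fill_water_tanks; infer_instance

def pvWitness_fill_water_tanks : List Int × Int × Int := ([3, 7, 2, 7], 3, 2)

def Spec_fill_water_tanks (buildings : List Int) (r : Int) (unit_capacity : Int) (out : List Int) : Prop := out = fill_water_tanks_alt buildings r unit_capacity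
instance (buildings : List Int) (r : Int) (unit_capacity : Int) (out : List Int) : Decidable (Spec_fill_water_tanks buildings r unit_capacity out) := by unfold Spec_fill_water_tanks; infer_instance

-- ===== CLAIM (what is proved, stated in full; the proofs are below) =====
def Claim_equal_fill_water_tanks : Prop := ∀ (buildings : List Int) (r : Int) (unit_capacity : Int), Dom_fill_water_tanks buildings r unit_capacity → Pre_fill_water_tanks buildings r unit_capacity → Spec_fill_water_tanks buildings r unit_capacity (fill_water_tanks buildings r unit_capacity)

-- ===== LEMMAS AND PROOFS =====

-- the strict total order that characterises A's stable descending sort of an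
-- enumeration: higher water first, ties by ascending original index
def pvR (a b : Int × Int) : Prop := b.2 < a.2 ∨ (a.2 = b.2 ∧ a.1 < b.1)

lemma pvR_asymm {a b : Int × Int} (h1 : pvR a b) (h2 : pvR b a) : False := by
  rcases h1 with h1 | ⟨h1, h1'⟩ <;> rcases h2 with h2 | ⟨h2, h2'⟩ <;> omega

lemma pvInsertBy_pairwise (x : Int × Int) (acc : List (Int × Int))
    (hpw : acc.Pairwise pvR) (hlt : ∀ a ∈ acc, a.1 < x.1) :
    (PySem.List.insertBy (fun a b => decide (b.2 < a.2)) x acc).Pairwise pvR := by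
  induction acc with
  | nil => simp [PySem.List.insertBy]
  | cons y ys ih =>
    rw [List.pairwise_cons] at hpw
    simp only [PySem.List.insertBy]
    by_cases h : y.2 < x.2
    · simp only [h, decide_true, if_true]
      refine List.Pairwise.cons ?_ (List.Pairwise.cons hpw.1 hpw.2)
      intro z hz
      rcases List.mem_cons.mp hz with rfl | hz
      · exact Or.inl h
      · have := hpw.1 z hz
        unfold pvR at this ⊢
        left; omega
    · simp only [h, decide_false]
      refine List.Pairwise.cons ?_ (ih hpw.2 (fun a ha => hlt a (List.mem_cons_of_mem _ ha)))
      intro z hz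
      rw [PySem.List.mem_insertBy] at hz
      rcases hz with rfl | hz
      · unfold pvR
        rcases lt_or_eq_of_le (not_lt.mp h) with h' | h'
        · exact Or.inl h'
        · exact Or.inr ⟨h'.symm, hlt y (List.mem_cons_self)⟩
      · exact hpw.1 z hz

lemma pvFoldl_insertBy_pairwise (l : List (Int × Int)) :
    ∀ (acc : List (Int × Int)),
    l.Pairwise (fun a b => a.1 < b.1) → acc.Pairwise pvR →
    (∀ a ∈ acc, ∀ x ∈ l, a.1 < x.1) →
    (l.foldl (fun acc x => PySem.List.insertBy (fun a b => decide (b.2 < a.2)) x acc) acc).Pairwise pvR := by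
  induction l with
  | nil => intro acc _ hpw _; simpa using hpw
  | cons x xs ih =>
    intro acc hl hpw hlt
    rw [List.pairwise_cons] at hl
    simp only [List.foldl_cons]
    refine ih _ hl.2 (pvInsertBy_pairwise x acc hpw (fun a ha => hlt a ha x List.mem_cons_self)) ?_
    intro a ha z hz
    rw [PySem.List.mem_insertBy] at ha
    rcases ha with rfl | ha
    · exact hl.1 z hz
    · exact hlt a ha z (List.mem_cons_of_mem _ hz)

lemma pvSortedRev_pairwise (l : List (Int × Int)) (hl : l.Pairwise (fun a b => a.1 < b.1)) :
    (PySem.List.sorted l (fun x => x.2) true).Pairwise pvR := by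
  rw [PySem.List.sorted_rev_eq_foldl_insertBy]
  exact pvFoldl_insertBy_pairwise l [] hl (by simp) (by simp)

lemma pvMaxw_spec (rest : List (Int × Int)) : ∀ (b : Int),
    (rest.foldl (fun bw q => if q.2 > bw then q.2 else bw) b = b ∨
      ∃ q ∈ rest, q.2 = rest.foldl (fun bw q => if q.2 > bw then q.2 else bw) b) ∧
    b ≤ rest.foldl (fun bw q => if q.2 > bw then q.2 else bw) b ∧
    ∀ q ∈ rest, q.2 ≤ rest.foldl (fun bw q => if q.2 > bw then q.2 else bw) b := by
  induction rest with
  | nil => intro b; simp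
  | cons p ps ih =>
    intro b
    simp only [List.foldl_cons]
    by_cases h : p.2 > b
    · simp only [if_pos h]
      obtain ⟨h1, h2, h3⟩ := ih p.2
      refine ⟨?_, by omega, ?_⟩
      · rcases h1 with h1 | ⟨q, hq, hq2⟩
        · exact Or.inr ⟨p, List.mem_cons_self, h1.symm ▸ rfl⟩
        · exact Or.inr ⟨q, List.mem_cons_of_mem _ hq, hq2⟩
      · intro q hq
        rcases List.mem_cons.mp hq with rfl | hq
        · exact h2
        · exact h3 q hq
    · simp only [if_neg h]
      obtain ⟨h1, h2, h3⟩ := ih b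
      refine ⟨?_, h2, ?_⟩
      · rcases h1 with h1 | ⟨q, hq, hq2⟩
        · exact Or.inl h1
        · exact Or.inr ⟨q, List.mem_cons_of_mem _ hq, hq2⟩
      · intro q hq
        rcases List.mem_cons.mp hq with rfl | hq
        · omega
        · exact h3 q hq

lemma pvExtract_spec (bw : Int) (l : List (Int × Int)) (hmem : ∃ q ∈ l, q.2 = bw) :
    ∃ pre suf b, l = pre ++ (b, bw) :: suf ∧ pvExtract bw l = (b, pre ++ suf) ∧
      ∀ q ∈ pre, q.2 ≠ bw := by
  induction l with
  | nil => simp at hmem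
  | cons p rest ih =>
    by_cases h : p.2 = bw
    · exact ⟨[], rest, p.1, by simp [← h], by simp [pvExtract, h], by simp⟩
    · obtain ⟨q, hq, hq2⟩ := hmem
      rcases List.mem_cons.mp hq with rfl | hq
      · exact absurd hq2 h
      obtain ⟨pre, suf, b, hl, he, hpre⟩ := ih ⟨q, hq, hq2⟩
      refine ⟨p :: pre, suf, b, by simp [hl], ?_, ?_⟩
      · simp [pvExtract, h, he]
      · intro q' hq'
        rcases List.mem_cons.mp hq' with rfl | hq'
        · exact h
        · exact hpre q' hq'

lemma pvSorted_step (p : Int × Int) (rest : List (Int × Int))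
    (hl : (p :: rest).Pairwise (fun a b => a.1 < b.1)) :
    PySem.List.sorted (p :: rest) (fun x => x.2) true =
      ((pvExtract (rest.foldl (fun bw q => if q.2 > bw then q.2 else bw) p.2) (p :: rest)).1,
        rest.foldl (fun bw q => if q.2 > bw then q.2 else bw) p.2) ::
      PySem.List.sorted (pvExtract (rest.foldl (fun bw q => if q.2 > bw then q.2 else bw) p.2) (p :: rest)).2 (fun x => x.2) true := by
  set mw := rest.foldl (fun bw q => if q.2 > bw then q.2 else bw) p.2 with hmw
  obtain ⟨h1, h2, h3⟩ := pvMaxw_spec rest p.2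
  have hmem : ∃ q ∈ p :: rest, q.2 = mw := by
    rcases h1 with h1 | ⟨q, hq, hq2⟩
    · exact ⟨p, List.mem_cons_self, h1.symm⟩
    · exact ⟨q, List.mem_cons_of_mem _ hq, hq2⟩
  obtain ⟨pre, suf, b, hsplit, he, hpre⟩ := pvExtract_spec mw (p :: rest) hmem
  rw [he]
  have hub : ∀ q ∈ p :: rest, q.2 ≤ mw := by
    intro q hq
    rcases List.mem_cons.mp hq with rfl | hq
    · exact h2
    · exact h3 q hq
  have hsub : (pre ++ suf).Sublist (p :: rest) := by
    rw [hsplit]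
    exact (List.Sublist.refl pre).append (List.sublist_cons_self _ _)
  have hps : (pre ++ suf).Pairwise (fun a b : Int × Int => a.1 < b.1) := List.Pairwise.sublist hsub hl
  have hbsuf : ∀ z ∈ suf, (b : Int) < z.1 := by
    have := hsplit ▸ hl
    have h' := (List.pairwise_append.mp this).2.1
    intro z hz
    exact (List.pairwise_cons.mp h').1 z hz
  refine List.Perm.eq_of_pairwise (fun a c _ _ hac hca => absurd hac (fun h => pvR_asymm h hca))
    (pvSortedRev_pairwise _ hl) ?_ ?_
  · refine List.Pairwise.cons ?_ (pvSortedRev_pairwise _ hps)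
    intro z hz
    rw [PySem.List.mem_sorted] at hz
    have hzle : z.2 ≤ mw := by
      have : z ∈ p :: rest := hsub.mem hz
      exact hub z this
    rcases List.mem_append.mp hz with hz | hz
    · exact Or.inl (lt_of_le_of_ne hzle (hpre z hz))
    · rcases lt_or_eq_of_le hzle with h' | h'
      · exact Or.inl h'
      · exact Or.inr ⟨h'.symm, hbsuf z hz⟩
  · have p1 : (PySem.List.sorted (p :: rest) (fun x => x.2) true).Perm (pre ++ (b, mw) :: suf) := by
      rw [← hsplit]; exact PySem.List.sorted_perm _ _ _
    exact p1.trans (List.perm_middle.trans (List.Perm.cons _ (PySem.List.sorted_perm _ _ _).symm))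

lemma pvLoops_eq (r unit_capacity : Int) :
    ∀ (n : Nat) (l : List (Int × Int)) (tf : Int) (acc : List Int),
      l.length ≤ n → l.Pairwise (fun a b => a.1 < b.1) →
      pvLoopA r unit_capacity (PySem.List.sorted l (fun x => x.2) true) tf acc =
        pvLoopB r unit_capacity n l tf acc := by
  intro n
  induction n with
  | zero =>
    intro l tf acc hlen _
    have : l = [] := List.eq_nil_of_length_eq_zero (Nat.le_zero.mp hlen)
    subst this
    simp [PySem.List.sorted, pvLoopA, pvLoopB]
  | succ m ih =>
    intro l tf acc hlen hl
    cases l with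
    | nil => simp [PySem.List.sorted, pvLoopA, pvLoopB]
    | cons p rest =>
      have hmem : ∃ q ∈ p :: rest, q.2 = rest.foldl (fun bw q => if q.2 > bw then q.2 else bw) p.2 := by
        obtain ⟨h1, _, _⟩ := pvMaxw_spec rest p.2
        rcases h1 with h1 | ⟨q, hq, hq2⟩
        · exact ⟨p, List.mem_cons_self, h1.symm⟩
        · exact ⟨q, List.mem_cons_of_mem _ hq, hq2⟩
      obtain ⟨pre, suf, b, hsplit, he, hpre⟩ := pvExtract_spec _ (p :: rest) hmem
      have hlen' : (pre ++ suf).length ≤ m := by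
        have h2 := congrArg List.length hsplit
        simp only [List.length_cons, List.length_append] at h2 hlen ⊢
        omega
      have hps : (pre ++ suf).Pairwise (fun a b : Int × Int => a.1 < b.1) := by
        refine List.Pairwise.sublist ?_ hl
        rw [hsplit]
        exact (List.Sublist.refl pre).append (List.sublist_cons_self _ _)
      rw [pvSorted_step p rest hl, he]
      simp only [pvLoopA, pvLoopB, he]
      split_ifs <;> first | rfl | exact ih (pre ++ suf) _ _ hlen' hps

-- ===== VERDICT (by name: the statement is the Claim_ definition above) =====
theorem fill_water_tanks_spec : Claim_equal_fill_water_tanks := by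
  intro buildings r unit_capacity _ _
  unfold Spec_fill_water_tanks fill_water_tanks fill_water_tanks_alt
  rw [← PySem.List.length_enumerate (xs := buildings) (s := 0)]
  exact pvLoops_eq r unit_capacity _ _ 0 [] le_rfl (PySem.List.pairwise_lt_enumerate buildings 0)
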